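-- pv_equiv track=rewrite | github.com/gazerol/Task1 | main.py | bananas
-- ===== SOURCE A (Python) =====
-- from itertools import combinations
--
-- def bananas(s) -> set:
--     result = set()
--     word = 'banana'
--     for combination in combinations(range(len(s)), len(s) - len(word)):
--         list_s = list(s)
--         for index in combination:
--             list_s[index] = '-'
--         if [item for item in list_s if item != '-'] == list(word):
--             result.add(''.join(list_s))
--     return result
-- ===== SOURCE B (Python) =====
-- def bananas(s) -> set:
--     # Recursively pick the 6 positions that keep the target word as a
--     # subsequence, instead of enumerating all C(n, n-6) deletion combinations.
--     # Keeps A's contract: a string too short to ever spell the word is a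
--     # misuse and raises ValueError (A raises it via combinations' negative r).
--     word = 'banana'
--     n = len(s)
--     if n < len(word):
--         raise ValueError('need at least %d characters' % len(word))
--     out = []
--
--     def go(i, j, prefix):
--         if j == len(word):
--             out.append(prefix + '-' * (n - i))
--             return
--         for k in range(n - 1, i - 1, -1):
--             if s[k] == word[j]:
--                 go(k + 1, j + 1, prefix + '-' * (k - i) + s[k])
--
--     go(0, 0, '')
--     return set(out)
-- ===== Notes on version B (the rewrite author's own statement) =====
-- stated objective: faster
-- what changed: Instead of enumerating all C(n, n-6) index combinations and testing each masked string, B recursively enumerates only the index 6-tuples at which the target word occurs in s as a subsequence and builds the masked strings directly; like A it raises ValueError on strings shorter than the target word.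
import Mathlib
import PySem

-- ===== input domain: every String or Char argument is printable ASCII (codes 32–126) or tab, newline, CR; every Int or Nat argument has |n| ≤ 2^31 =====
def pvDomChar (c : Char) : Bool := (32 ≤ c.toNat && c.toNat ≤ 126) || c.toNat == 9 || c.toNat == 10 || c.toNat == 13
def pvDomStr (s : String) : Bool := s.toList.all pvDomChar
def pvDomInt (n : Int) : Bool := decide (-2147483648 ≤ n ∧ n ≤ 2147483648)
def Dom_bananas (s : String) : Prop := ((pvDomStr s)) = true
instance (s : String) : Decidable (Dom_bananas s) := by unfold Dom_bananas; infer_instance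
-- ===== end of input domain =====

-- B replaces A's scan of all C(n, n-6) deletion combinations by a recursion that
-- enumerates only the index 6-tuples at which the target word occurs in s as a
-- subsequence (faster in a timing run on the generated inputs). Like A (which
-- raises ValueError through combinations' negative r), B raises ValueError when
-- len(s) < 6; Pre_ excludes exactly those inputs.

-- ===== PORT A =====
-- itertools.combinations(range(n), k) in lexicographic order, elements drawn from [lo, n)
def pvCombs : Nat → Nat → Nat → List (List Nat)
  | _, _, 0 => [[]]
  | lo, n, (k+1) => (List.range' lo (n - lo)).flatMap
      (fun i => (pvCombs (i+1) n k).map (fun t => i :: t))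

def bananas (s : String) : List String :=
  -- Pre_bananas gives 6 ≤ len(s); Python raises ValueError for len(s) < 6
  -- (combinations with negative r), so the Nat subtraction below is exact on Pre_.
  let l := s.toList
  let word := "banana".toList
  (pvCombs 0 l.length (l.length - word.length)).foldl
    (fun result C =>
      let list_s := C.foldl (fun t i => t.set i '-') l
      if list_s.filter (fun c => c != '-') = word then
        PySem.Set.add result (String.ofList list_s)
      else result)
    PySem.Set.empty

-- ===== PORT B =====
-- the nested function go(i, j, prefix): recursion on the remaining word, with the
-- index loop 'for k in range(n-1, i-1, -1)'
def pvGoB (l : List Char) : List Char → Nat → List Char → List (List Char)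
  | [], i, pfx => [pfx ++ List.replicate (l.length - i) '-']
  | (w :: ws), i, pfx =>
      ((List.range' i (l.length - i)).reverse).flatMap
        (fun k => if l.getD k ' ' = w then
            pvGoB l ws (k+1) (pfx ++ List.replicate (k - i) '-' ++ [l.getD k ' '])
          else [])

def bananas_alt (s : String) : List String :=
  PySem.Set.ofList ((pvGoB s.toList "banana".toList 0 []).map String.ofList)

-- ===== PRECONDITION & SPEC =====
-- Pre_ excludes exactly the inputs (len(s) < 6) on which both Pythons raise ValueError.
def Pre_bananas (s : String) : Prop := 6 ≤ s.toList.length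
instance (s : String) : Decidable (Pre_bananas s) := by unfold Pre_bananas; infer_instance

def pvWitness_bananas : String := "bananas"

def Spec_bananas (s : String) (out : List String) : Prop := out = bananas_alt s
instance (s : String) (out : List String) : Decidable (Spec_bananas s out) := by unfold Spec_bananas; infer_instance

-- ===== CLAIM (what is proved, stated in full; the proofs are below) =====
def Claim_equal_bananas : Prop := ∀ (s : String), Dom_bananas s → Pre_bananas s → Spec_bananas s (bananas s)

-- ===== LEMMAS AND PROOFS =====

-- the kept-position view of a masked string: positions in I keep their letter, the rest is '-'
def pvMask (l : List Char) (I : List Nat) : List Char :=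
  (List.range l.length).map (fun p => if p ∈ I then l.getD p ' ' else '-')

-- complement of an index set inside [0, n)
def pvCompl (n : Nat) (C : List Nat) : List Nat :=
  (List.range n).filter (fun p => decide (p ∉ C))

-- positions of '-' in a masked string
def pvDashPos (t : List Char) : List Nat :=
  (List.range t.length).filter (fun p => decide (t.getD p ' ' = '-'))

-- I is a strictly increasing, in-range (all ≥ i) occurrence of w as a subsequence of l
def pvMatch (l w : List Char) (i : Nat) (I : List Nat) : Prop :=
  I.Pairwise (· < ·) ∧ (∀ p ∈ I, i ≤ p ∧ p < l.length) ∧ I.map (fun p => l.getD p ' ') = w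

-- index lists produced by B's recursion (reverse-lex order)
def pvMatchIdx (l : List Char) : List Char → Nat → List (List Nat)
  | [], _ => [[]]
  | (w :: ws), i => ((List.range' i (l.length - i)).reverse).flatMap
      (fun k => if l.getD k ' ' = w then (pvMatchIdx l ws (k+1)).map (fun I => k :: I) else [])

theorem pvBananaChars : "banana".toList = ['b','a','n','a','n','a'] := rfl

theorem pvLexAsymm {C1 C2 : List Nat} (h1 : List.Lex (· < ·) C1 C2)
    (h2 : List.Lex (· < ·) C2 C1) : False := by
  induction h1 with
  | nil => cases h2
  | @cons a l1 l2 h ih => cases h2 with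
    | cons h' => exact ih h'
    | rel h' => exact absurd h' (lt_irrefl a)
  | @rel a l1 b l2 h => cases h2 with
    | cons h' => exact absurd h (lt_irrefl _)
    | rel h' => omega

theorem pvChainEq {l1 l2 : List Nat} (h1 : l1.Pairwise (· < ·)) (h2 : l2.Pairwise (· < ·))
    (h : ∀ x, x ∈ l1 ↔ x ∈ l2) : l1 = l2 := by
  refine List.Perm.eq_of_pairwise (le := (· < ·)) (fun a b _ _ hab hba => absurd hba (lt_asymm hab)) h1 h2 ?_
  exact (List.perm_ext_iff_of_nodup h1.nodup h2.nodup).mpr h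

theorem pvLexFirstDiff {C1 C2 : List Nat} (h1 : C1.Pairwise (· < ·)) (h2 : C2.Pairwise (· < ·))
    (hlen : C1.length = C2.length) (hlex : List.Lex (· < ·) C1 C2) :
    ∃ p, p ∈ C1 ∧ p ∉ C2 ∧ ∀ q, q < p → (q ∈ C1 ↔ q ∈ C2) := by
  induction hlex with
  | nil => simp at hlen
  | @rel a l1 b l2 hab =>
    refine ⟨a, List.mem_cons_self, ?_, ?_⟩
    · intro hmem
      rcases List.mem_cons.mp hmem with h | h
      · omega
      · have := (List.pairwise_cons.mp h2).1 a h; omega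
    · intro q hq
      constructor
      · intro hmem
        rcases List.mem_cons.mp hmem with h | h
        · omega
        · have := (List.pairwise_cons.mp h1).1 q h; omega
      · intro hmem
        rcases List.mem_cons.mp hmem with h | h
        · omega
        · have := (List.pairwise_cons.mp h2).1 q h; omega
  | @cons a l1 l2 hlex ih =>
    obtain ⟨p, hp1, hp2, hbelow⟩ := ih (List.pairwise_cons.mp h1).2 (List.pairwise_cons.mp h2).2 (by simpa using hlen)
    have hap : a < p := (List.pairwise_cons.mp h1).1 p hp1
    refine ⟨p, List.mem_cons_of_mem _ hp1, ?_, ?_⟩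
    · intro hmem
      rcases List.mem_cons.mp hmem with h | h
      · omega
      · exact hp2 h
    · intro q hq
      simp only [List.mem_cons]
      constructor
      · rintro (h | h); · exact Or.inl h
        · exact Or.inr ((hbelow q hq).mp h)
      · rintro (h | h); · exact Or.inl h
        · exact Or.inr ((hbelow q hq).mpr h)

theorem pvFirstDiffLex {C1 C2 : List Nat} (h1 : C1.Pairwise (· < ·)) (h2 : C2.Pairwise (· < ·))
    (hlen : C1.length = C2.length) {p : Nat} (hp1 : p ∈ C1) (hp2 : p ∉ C2)
    (hbelow : ∀ q, q < p → (q ∈ C1 ↔ q ∈ C2)) : List.Lex (· < ·) C1 C2 := by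
  induction C1 generalizing C2 with
  | nil => simp at hp1
  | cons a t1 ih =>
    cases C2 with
    | nil => simp at hlen
    | cons b t2 =>
      rcases Nat.lt_trichotomy a b with hab | hab | hab
      · exact List.Lex.rel hab
      · subst hab
        have hpa : p ≠ a := by rintro rfl; exact hp2 List.mem_cons_self
        have hpt1 : p ∈ t1 := by rcases List.mem_cons.mp hp1 with h | h; · omega
                                 · exact h
        have hap : a < p := (List.pairwise_cons.mp h1).1 p hpt1
        refine List.Lex.cons (ih (List.pairwise_cons.mp h1).2 (List.pairwise_cons.mp h2).2
          (by simpa using hlen) hpt1 (fun h => hp2 (List.mem_cons_of_mem _ h)) ?_)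
        intro q hq
        constructor
        · intro hmem
          have : q ∈ a :: t2 := (hbelow q hq).mp (List.mem_cons_of_mem _ hmem)
          rcases List.mem_cons.mp this with h | h
          · subst h; have := (List.pairwise_cons.mp h1).1 q hmem; omega
          · exact h
        · intro hmem
          have : q ∈ a :: t1 := (hbelow q hq).mpr (List.mem_cons_of_mem _ hmem)
          rcases List.mem_cons.mp this with h | h
          · subst h; have := (List.pairwise_cons.mp h2).1 q hmem; omega
          · exact h
      · exfalso
        have hbp : b < p := by
          rcases List.mem_cons.mp hp1 with h | h
          · omega
          · have := (List.pairwise_cons.mp h1).1 p h; omega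
        have : b ∈ a :: t1 := (hbelow b hbp).mpr List.mem_cons_self
        rcases List.mem_cons.mp this with h | h
        · omega
        · have := (List.pairwise_cons.mp h1).1 b h; omega

theorem pvMemCompl {n : Nat} {C : List Nat} {p : Nat} :
    p ∈ pvCompl n C ↔ p < n ∧ p ∉ C := by
  simp [pvCompl]

theorem pvComplPairwise (n : Nat) (C : List Nat) : (pvCompl n C).Pairwise (· < ·) :=
  List.Pairwise.filter _ List.pairwise_lt_range

theorem pvComplLength {n : Nat} {C : List Nat} (hC : C.Pairwise (· < ·))
    (hb : ∀ x ∈ C, x < n) : (pvCompl n C).length = n - C.length := by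
  have hfil : (List.range n).filter (fun p => ! decide (p ∉ C)) = C := by
    refine pvChainEq (List.Pairwise.filter _ List.pairwise_lt_range) hC ?_
    intro x
    simp only [List.mem_filter, List.mem_range, Bool.not_eq_eq_eq_not, Bool.not_true,
      decide_eq_false_iff_not, not_not]
    exact ⟨fun h => h.2, fun h => ⟨hb x h, h⟩⟩
  have := List.length_eq_length_filter_add (l := List.range n) (fun p => decide (p ∉ C))
  rw [hfil, List.length_range] at this
  unfold pvCompl
  omega

theorem pvComplCompl {n : Nat} {C : List Nat} (hC : C.Pairwise (· < ·))
    (hb : ∀ x ∈ C, x < n) : pvCompl n (pvCompl n C) = C := by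
  refine pvChainEq (pvComplPairwise n _) hC ?_
  intro x
  simp only [pvMemCompl, not_and, not_not]
  constructor
  · rintro ⟨hx, h⟩; exact h hx
  · intro h; exact ⟨hb x h, fun _ => h⟩

theorem pvComplLex {n : Nat} {C1 C2 : List Nat} (h1 : C1.Pairwise (· < ·))
    (h2 : C2.Pairwise (· < ·)) (hb1 : ∀ x ∈ C1, x < n) (hb2 : ∀ x ∈ C2, x < n)
    (hlen : C1.length = C2.length) (hlex : List.Lex (· < ·) C1 C2) :
    List.Lex (· < ·) (pvCompl n C2) (pvCompl n C1) := by
  obtain ⟨p, hp1, hp2, hbelow⟩ := pvLexFirstDiff h1 h2 hlen hlex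
  refine pvFirstDiffLex (pvComplPairwise n C2) (pvComplPairwise n C1)
    (by rw [pvComplLength h2 hb2, pvComplLength h1 hb1, hlen])
    (p := p) (pvMemCompl.mpr ⟨hb1 p hp1, hp2⟩)
    (fun h => (pvMemCompl.mp h).2 hp1) ?_
  intro q hq
  simp only [pvMemCompl]
  exact and_congr_right fun _ => not_congr (hbelow q hq).symm

theorem pvCombsMem {lo n k : Nat} {C : List Nat} :
    C ∈ pvCombs lo n k ↔ C.length = k ∧ C.Pairwise (· < ·) ∧ ∀ x ∈ C, lo ≤ x ∧ x < n := by
  induction k generalizing lo C with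
  | zero =>
    simp only [pvCombs, List.mem_singleton]
    constructor
    · rintro rfl; simp
    · rintro ⟨h, -, -⟩; exact List.eq_nil_of_length_eq_zero h
  | succ k ih =>
    simp only [pvCombs, List.mem_flatMap, List.mem_map, List.mem_range'_1]
    constructor
    · rintro ⟨i, ⟨hi1, hi2⟩, t, ht, rfl⟩
      obtain ⟨hlen, hpw, hb⟩ := ih.mp ht
      refine ⟨by simp [hlen], List.pairwise_cons.mpr ⟨fun x hx => by have := (hb x hx).1; omega, hpw⟩, ?_⟩
      intro x hx
      rcases List.mem_cons.mp hx with rfl | hx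
      · omega
      · have := hb x hx; omega
    · rintro ⟨hlen, hpw, hb⟩
      cases C with
      | nil => simp at hlen
      | cons i t =>
        obtain ⟨hhead, hpw'⟩ := List.pairwise_cons.mp hpw
        have hbi := hb i List.mem_cons_self
        refine ⟨i, by omega, t, ih.mpr ⟨by simpa using hlen, hpw', ?_⟩, rfl⟩
        intro x hx
        have h1 := hhead x hx
        have h2 := hb x (List.mem_cons_of_mem _ hx)
        omega

theorem pvCombsPairwise (lo n k : Nat) :
    (pvCombs lo n k).Pairwise (List.Lex (· < ·)) := by
  induction k generalizing lo with
  | zero => simp [pvCombs]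
  | succ k ih =>
    rw [pvCombs, List.pairwise_flatMap]
    constructor
    · intro i _
      exact (List.pairwise_map).mpr ((ih (i+1)).imp (fun h => List.Lex.cons h))
    · have hr : (List.range' lo (n - lo)).Pairwise (· < ·) :=
        List.pairwise_lt_range'
      refine hr.imp ?_
      intro i1 i2 h x hx y hy
      obtain ⟨t1, -, rfl⟩ := List.mem_map.mp hx
      obtain ⟨t2, -, rfl⟩ := List.mem_map.mp hy
      exact List.Lex.rel h

theorem pvGetDSet (l : List Char) (c p : Nat) (hc : c < l.length) :
    (l.set c '-').getD p ' ' = if p = c then '-' else l.getD p ' ' := by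
  by_cases h : p = c
  · subst h; simp [List.getD_eq_getElem?_getD, hc]
  · simp only [List.getD_eq_getElem?_getD, List.getElem?_set, if_neg h]
    rw [if_neg (fun hh => h hh.symm)]

theorem pvFoldlSet {l : List Char} {C : List Nat} (hb : ∀ x ∈ C, x < l.length) :
    C.foldl (fun t i => t.set i '-') l
      = (List.range l.length).map (fun p => if p ∈ C then '-' else l.getD p ' ') := by
  induction C generalizing l with
  | nil =>
    simp only [List.foldl_nil, List.not_mem_nil, if_false]
    apply List.ext_getElem
    · simp
    · intro i h1 h2
      simp [List.getD_eq_getElem?_getD, List.getElem?_eq_getElem h1]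
  | cons c C ih =>
    have hc : c < l.length := hb c List.mem_cons_self
    rw [List.foldl_cons, ih (by intro x hx; rw [List.length_set]; exact hb x (List.mem_cons_of_mem _ hx))]
    rw [List.length_set]
    apply List.map_congr_left
    intro p hp
    rw [pvGetDSet l c p hc]
    by_cases h1 : p ∈ C
    · simp [h1, List.mem_cons]
    · by_cases h2 : p = c <;> simp [h1, h2, List.mem_cons]

theorem pvMaskCompl {l : List Char} {C : List Nat} :
    (List.range l.length).map (fun p => if p ∈ C then '-' else l.getD p ' ')
      = pvMask l (pvCompl l.length C) := by
  unfold pvMask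
  apply List.map_congr_left
  intro p hp
  rw [List.mem_range] at hp
  by_cases h : p ∈ C <;> simp [h, pvMemCompl, hp]

theorem pvValidIffMatch {l : List Char} {C : List Nat} (hn : 6 ≤ l.length)
    (hC : C.Pairwise (· < ·)) (hb : ∀ x ∈ C, x < l.length) (hlen : C.length = l.length - 6) :
    (((List.range l.length).map (fun p => if p ∈ C then '-' else l.getD p ' ')).filter
        (fun c => c != '-') = "banana".toList)
      ↔ pvMatch l "banana".toList 0 (pvCompl l.length C) := by
  have hreshape :
      ((List.range l.length).map (fun p => if p ∈ C then '-' else l.getD p ' ')).filter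
        (fun c => c != '-')
      = ((pvCompl l.length C).filter (fun p => l.getD p ' ' != '-')).map
          (fun p => l.getD p ' ') := by
    rw [List.filter_map]
    have h1 : (List.range l.length).filter
        ((fun c => c != '-') ∘ (fun p => if p ∈ C then '-' else l.getD p ' '))
        = (pvCompl l.length C).filter (fun p => l.getD p ' ' != '-') := by
      unfold pvCompl
      rw [List.filter_filter]
      apply List.filter_congr
      intro p _
      by_cases h : p ∈ C <;> simp [h]
    rw [h1]
    apply List.map_congr_left
    intro p hp
    have : p ∉ C := (pvMemCompl.mp (List.mem_filter.mp hp).1).2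
    simp [this]
  rw [hreshape]
  have hIlen : (pvCompl l.length C).length = 6 := by
    rw [pvComplLength hC hb, hlen]; omega
  constructor
  · intro h
    have hJlen : ((pvCompl l.length C).filter (fun p => l.getD p ' ' != '-')).length = 6 := by
      have := congrArg List.length h
      simpa using this
    have hJ : (pvCompl l.length C).filter (fun p => l.getD p ' ' != '-') = pvCompl l.length C :=
      List.Sublist.eq_of_length List.filter_sublist (by rw [hJlen, hIlen])
    rw [hJ] at h
    exact ⟨pvComplPairwise _ _, fun p hp => ⟨Nat.zero_le p, (pvMemCompl.mp hp).1⟩, h⟩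
  · rintro ⟨-, -, hmap⟩
    have hJ : (pvCompl l.length C).filter (fun p => l.getD p ' ' != '-') = pvCompl l.length C := by
      apply List.filter_eq_self.mpr
      intro p hp
      have : l.getD p ' ' ∈ "banana".toList := hmap ▸ List.mem_map_of_mem hp
      rw [pvBananaChars] at this
      simp only [bne_iff_ne, ne_eq]
      intro hc
      rw [hc] at this
      simp at this
    rw [hJ, hmap]

theorem pvMatchIdxMem {l w : List Char} {i : Nat} {I : List Nat} :
    I ∈ pvMatchIdx l w i ↔ pvMatch l w i I := by
  induction w generalizing i I with
  | nil =>
    simp only [pvMatchIdx, List.mem_singleton, pvMatch]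
    constructor
    · rintro rfl; simp
    · rintro ⟨-, -, hmap⟩
      simpa using List.map_eq_nil_iff.mp hmap
  | cons w ws ih =>
    simp only [pvMatchIdx, List.mem_flatMap, List.mem_reverse, List.mem_range'_1]
    constructor
    · rintro ⟨k, ⟨hk1, hk2⟩, hif⟩
      by_cases hg : l.getD k ' ' = w
      · rw [if_pos hg] at hif
        obtain ⟨I', hI', rfl⟩ := List.mem_map.mp hif
        obtain ⟨hpw, hbd, hmap⟩ := ih.mp hI'
        refine ⟨List.pairwise_cons.mpr ⟨fun p hp => by have := (hbd p hp).1; omega, hpw⟩, ?_, ?_⟩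
        · intro p hp
          rcases List.mem_cons.mp hp with rfl | hp
          · omega
          · have := hbd p hp; omega
        · rw [List.map_cons, hg, hmap]
      · rw [if_neg hg] at hif; simp at hif
    · rintro ⟨hpw, hbd, hmap⟩
      cases I with
      | nil => simp at hmap
      | cons k I' =>
        simp only [List.map_cons, List.cons.injEq] at hmap
        obtain ⟨hg, hmap'⟩ := hmap
        have hkb := hbd k List.mem_cons_self
        refine ⟨k, by omega, ?_⟩
        rw [if_pos hg]
        apply List.mem_map.mpr
        refine ⟨I', ih.mpr ⟨(List.pairwise_cons.mp hpw).2, ?_, hmap'⟩, rfl⟩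
        intro p hp
        have h1 := (List.pairwise_cons.mp hpw).1 p hp
        have h2 := hbd p (List.mem_cons_of_mem _ hp)
        omega

theorem pvMatchIdxPairwise (l w : List Char) (i : Nat) :
    (pvMatchIdx l w i).Pairwise (fun I1 I2 => List.Lex (· < ·) I2 I1) := by
  induction w generalizing i with
  | nil => simp [pvMatchIdx]
  | cons w ws ih =>
    rw [pvMatchIdx, List.pairwise_flatMap]
    constructor
    · intro k _
      by_cases hg : l.getD k ' ' = w
      · rw [if_pos hg]
        exact (List.pairwise_map).mpr ((ih (k+1)).imp (fun h => List.Lex.cons h))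
      · rw [if_neg hg]; exact List.Pairwise.nil
    · have hr : ((List.range' i (l.length - i)).reverse).Pairwise (fun a b => b < a) :=
        List.pairwise_reverse.mpr List.pairwise_lt_range'
      refine hr.imp ?_
      intro k1 k2 h x hx y hy
      by_cases h1 : l.getD k1 ' ' = w
      · by_cases h2 : l.getD k2 ' ' = w
        · rw [if_pos h1] at hx; rw [if_pos h2] at hy
          obtain ⟨t1, -, rfl⟩ := List.mem_map.mp hx
          obtain ⟨t2, -, rfl⟩ := List.mem_map.mp hy
          exact List.Lex.rel h
        · rw [if_neg h2] at hy; simp at hy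
      · rw [if_neg h1] at hx; simp at hx

theorem pvGoBEq (l : List Char) (w : List Char) (i : Nat) (pfx : List Char) :
    pvGoB l w i pfx = (pvMatchIdx l w i).map
      (fun I => pfx ++ (List.range' i (l.length - i)).map
        (fun p => if p ∈ I then l.getD p ' ' else '-')) := by
  induction w generalizing i pfx with
  | nil =>
    simp only [pvGoB, pvMatchIdx, List.map_cons, List.map_nil, List.not_mem_nil, if_false,
      List.map_const', List.length_range']
  | cons w ws ih =>
    rw [pvGoB, pvMatchIdx, List.map_flatMap]
    apply List.flatMap_congr
    intro k hk
    rw [List.mem_reverse, List.mem_range'_1] at hk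
    have hik : i ≤ k := hk.1
    have hkn : k < l.length := by omega
    by_cases hg : l.getD k ' ' = w
    · rw [if_pos hg, if_pos hg, ih, List.map_map]
      apply List.map_congr_left
      intro I hI
      obtain ⟨-, hbd, -⟩ := pvMatchIdxMem.mp hI
      simp only [Function.comp]
      have h2 : (k-i) + (l.length - k) = l.length - i := by omega
      have h1 : i + 1*(k-i) = k := by omega
      have hsplit : List.range' i (l.length - i) = List.range' i (k-i) ++ List.range' k (l.length - k) := by
        rw [← h2, ← List.range'_append, h1]
      have h3 : l.length - k = (l.length - (k+1)) + 1 := by omega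
      rw [hsplit, h3, List.range'_succ, List.map_append, List.map_cons]
      have hc1 : (List.range' i (k-i)).map (fun p => if p ∈ k :: I then l.getD p ' ' else '-')
          = List.replicate (k-i) '-' := by
        rw [show List.replicate (k-i) '-' = List.replicate (List.range' i (k-i)).length '-' by rw [List.length_range'],
          ← List.map_const']
        apply List.map_congr_left
        intro p hp
        rw [List.mem_range'_1] at hp
        have hpk : p < k := by omega
        have : p ∉ k :: I := by
          intro hmem
          rcases List.mem_cons.mp hmem with rfl | hmem
          · omega
          · have := (hbd p hmem).1; omega
        rw [if_neg this]
      have hc2 : (if k ∈ k :: I then l.getD k ' ' else '-') = l.getD k ' ' := by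
        rw [if_pos List.mem_cons_self]
      have hc3 : (List.range' (k+1) (l.length - (k+1))).map (fun p => if p ∈ k :: I then l.getD p ' ' else '-')
          = (List.range' (k+1) (l.length - (k+1))).map (fun p => if p ∈ I then l.getD p ' ' else '-') := by
        apply List.map_congr_left
        intro p hp
        rw [List.mem_range'_1] at hp
        have : p ∈ k :: I ↔ p ∈ I := by
          simp only [List.mem_cons, or_iff_right_iff_imp]
          intro h; omega
        simp only [this]
      rw [hc1, hc2, hc3]
      simp [List.append_assoc]
    · rw [if_neg hg, if_neg hg, List.map_nil]

theorem pvDashPosMask {l : List Char} {I : List Nat}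
    (hnd : ∀ p ∈ I, l.getD p ' ' ≠ '-') :
    pvDashPos (pvMask l I) = pvCompl l.length I := by
  unfold pvDashPos pvCompl
  have hlen : (pvMask l I).length = l.length := by simp [pvMask]
  rw [hlen]
  apply List.filter_congr
  intro p hp
  rw [List.mem_range] at hp
  have hget : (pvMask l I).getD p ' ' = if p ∈ I then l.getD p ' ' else '-' := by
    unfold pvMask
    rw [List.getD_eq_getElem?_getD, List.getElem?_map, List.getElem?_range hp]
    rfl
  rw [hget]
  by_cases h : p ∈ I
  · rw [if_pos h]
    simp only [h, not_true_eq_false, decide_false]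
    exact decide_eq_false (hnd p h)
  · rw [if_neg h]
    simp [h]

theorem pvMatchNoDash {l : List Char} {i : Nat} {I : List Nat}
    (h : pvMatch l "banana".toList i I) : ∀ p ∈ I, l.getD p ' ' ≠ '-' := by
  obtain ⟨-, -, hmap⟩ := h
  intro p hp hc
  have : l.getD p ' ' ∈ "banana".toList := hmap ▸ List.mem_map_of_mem hp
  rw [hc] at this
  simp at this

theorem pvMatchLen {l : List Char} {i : Nat} {I : List Nat}
    (h : pvMatch l "banana".toList i I) : I.length = 6 := by
  obtain ⟨-, -, hmap⟩ := h
  have := congrArg List.length hmap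
  simpa using this

theorem pvFoldlAdd {α β : Type} [BEq β] (p : α → Prop) [DecidablePred p] (f : α → β)
    (L : List α) (acc : PySem.Set β) :
    L.foldl (fun r C => if p C then PySem.Set.add r (f C) else r) acc
      = (L.filterMap (fun C => if p C then some (f C) else none)).foldl PySem.Set.add acc := by
  induction L generalizing acc with
  | nil => rfl
  | cons a L ih =>
    by_cases h : p a
    · simp only [List.foldl_cons, List.filterMap_cons, if_pos h]
      exact ih _
    · simp only [List.foldl_cons, List.filterMap_cons, if_neg h]
      exact ih _

theorem pvMainEq {l : List Char} (hn : 6 ≤ l.length) :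
    (pvCombs 0 l.length (l.length - 6)).filterMap
        (fun C => if ((List.range l.length).map
            (fun p => if p ∈ C then '-' else l.getD p ' ')).filter (fun c => c != '-')
            = "banana".toList
          then some ((List.range l.length).map (fun p => if p ∈ C then '-' else l.getD p ' '))
          else none)
      = (pvMatchIdx l "banana".toList 0).map (fun I => pvMask l I) := by
  set n := l.length with hnd
  set w := "banana".toList with hw
  set F : List Nat → Option (List Char) := (fun C =>
    if ((List.range n).map (fun p => if p ∈ C then '-' else l.getD p ' ')).filter (fun c => c != '-') = w
    then some ((List.range n).map (fun p => if p ∈ C then '-' else l.getD p ' ')) else none) with hF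
  -- properties of a combination producing `some t`
  have hstep : ∀ {C : List Nat} {t : List Char}, C ∈ pvCombs 0 n (n - 6) →
      F C = some t →
      pvMatch l w 0 (pvCompl n C) ∧ t = pvMask l (pvCompl n C) ∧ pvDashPos t = C := by
    intro C t hC hsome
    obtain ⟨hlen, hpw, hbd⟩ := pvCombsMem.mp hC
    have hb : ∀ x ∈ C, x < n := fun x hx => (hbd x hx).2
    rw [hF] at hsome
    simp only [] at hsome
    split at hsome
    case isFalse => exact absurd hsome (by simp)
    case isTrue hvalid =>
      have hmatch := (pvValidIffMatch hn hpw hb hlen).mp hvalid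
      have ht : t = pvMask l (pvCompl n C) := by
        have := Option.some.inj hsome
        rw [← this, pvMaskCompl]
      refine ⟨hmatch, ht, ?_⟩
      rw [ht, pvDashPosMask (pvMatchNoDash hmatch), pvComplCompl hpw hb]
  -- pairwise on the A side
  have hpwA : ((pvCombs 0 n (n - 6)).filterMap F).Pairwise
      (fun t1 t2 => List.Lex (· < ·) (pvDashPos t1) (pvDashPos t2)) := by
    apply List.pairwise_filterMap.mpr
    refine (pvCombsPairwise 0 n (n - 6)).imp_of_mem ?_
    intro C1 C2 h1 h2 hlex t1 hs1 t2 hs2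
    obtain ⟨-, -, hd1⟩ := hstep h1 hs1
    obtain ⟨-, -, hd2⟩ := hstep h2 hs2
    rw [hd1, hd2]
    exact hlex
  -- pairwise on the B side
  have hpwB : ((pvMatchIdx l w 0).map (fun I => pvMask l I)).Pairwise
      (fun t1 t2 => List.Lex (· < ·) (pvDashPos t1) (pvDashPos t2)) := by
    apply List.pairwise_map.mpr
    refine (pvMatchIdxPairwise l w 0).imp_of_mem ?_
    intro I1 I2 h1 h2 hlex
    have hm1 := pvMatchIdxMem.mp h1
    have hm2 := pvMatchIdxMem.mp h2
    rw [pvDashPosMask (pvMatchNoDash hm1), pvDashPosMask (pvMatchNoDash hm2)]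
    exact pvComplLex hm2.1 hm1.1 (fun x hx => (hm2.2.1 x hx).2) (fun x hx => (hm1.2.1 x hx).2)
      (by rw [pvMatchLen hm2, pvMatchLen hm1]) hlex
  -- membership
  have hmem : ∀ t, (t ∈ (pvCombs 0 n (n - 6)).filterMap F) ↔ t ∈ (pvMatchIdx l w 0).map (fun I => pvMask l I) := by
    intro t
    rw [List.mem_filterMap]
    constructor
    · rintro ⟨C, hC, hsome⟩
      obtain ⟨hmatch, ht, -⟩ := hstep hC hsome
      exact List.mem_map.mpr ⟨pvCompl n C, pvMatchIdxMem.mpr hmatch, ht.symm⟩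
    · intro hmem
      obtain ⟨I, hI, rfl⟩ := List.mem_map.mp hmem
      have hm := pvMatchIdxMem.mp hI
      have hbI : ∀ x ∈ I, x < n := fun x hx => (hm.2.1 x hx).2
      have hCmem : pvCompl n I ∈ pvCombs 0 n (n - 6) := by
        apply pvCombsMem.mpr
        refine ⟨?_, pvComplPairwise n I, fun x hx => ⟨Nat.zero_le x, (pvMemCompl.mp hx).1⟩⟩
        rw [pvComplLength hm.1 hbI, pvMatchLen hm]
      refine ⟨pvCompl n I, hCmem, ?_⟩
      have hcc : pvCompl n (pvCompl n I) = I := pvComplCompl hm.1 hbI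
      have hvalid := (pvValidIffMatch hn (pvComplPairwise n I)
        (fun x hx => (pvMemCompl.mp hx).1)
        (by rw [pvComplLength hm.1 hbI, pvMatchLen hm])).mpr (by rw [hcc]; exact hm)
      rw [hF]
      simp only []
      rw [if_pos hvalid, pvMaskCompl, hcc]
  -- conclude
  refine List.Perm.eq_of_pairwise (fun a b _ _ hab hba => (pvLexAsymm hab hba).elim) hpwA hpwB ?_
  have ndA : ((pvCombs 0 n (n - 6)).filterMap F).Nodup :=
    hpwA.imp (fun {a b} hr heq => (pvLexAsymm (heq ▸ hr) (heq ▸ hr)).elim)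
  have ndB : ((pvMatchIdx l w 0).map (fun I => pvMask l I)).Nodup :=
    hpwB.imp (fun {a b} hr heq => (pvLexAsymm (heq ▸ hr) (heq ▸ hr)).elim)
  exact (List.perm_ext_iff_of_nodup ndA ndB).mpr hmem

-- ===== VERDICT (by name: the statement is the Claim_ definition above) =====
theorem bananas_spec : Claim_equal_bananas := by
  intro s _ hpre
  unfold Spec_bananas
  have hn : 6 ≤ s.toList.length := hpre
  unfold bananas bananas_alt
  simp only []
  set l := s.toList with hl
  have hword : ("banana".toList).length = 6 := rfl
  rw [hword]
  rw [pvFoldlAdd (fun C => (C.foldl (fun t i => t.set i '-') l).filter (fun c => c != '-') = "banana".toList)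
      (fun C => String.ofList (C.foldl (fun t i => t.set i '-') l))
      (pvCombs 0 l.length (l.length - 6)) PySem.Set.empty]
  have hcongr : (pvCombs 0 l.length (l.length - 6)).filterMap
      (fun C => if (C.foldl (fun t i => t.set i '-') l).filter (fun c => c != '-') = "banana".toList
        then some (String.ofList (C.foldl (fun t i => t.set i '-') l)) else none)
      = (pvCombs 0 l.length (l.length - 6)).filterMap
      (fun C => Option.map String.ofList
        (if ((List.range l.length).map (fun p => if p ∈ C then '-' else l.getD p ' ')).filter (fun c => c != '-') = "banana".toList
          then some ((List.range l.length).map (fun p => if p ∈ C then '-' else l.getD p ' '))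
          else none)) := by
    apply List.filterMap_congr
    intro C hC
    obtain ⟨-, -, hbd⟩ := pvCombsMem.mp hC
    rw [pvFoldlSet (fun x hx => (hbd x hx).2)]
    by_cases h : ((List.range l.length).map (fun p => if p ∈ C then '-' else l.getD p ' ')).filter (fun c => c != '-') = "banana".toList
    · rw [if_pos h, if_pos h]; rfl
    · rw [if_neg h, if_neg h]; rfl
  rw [hcongr, ← List.map_filterMap, pvMainEq hn]
  rw [pvGoBEq]
  simp only [List.nil_append, Nat.sub_zero, ← List.range_eq_range']
  rw [PySem.Set.ofList_eq_foldl]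
  rfl
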